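-- pv_equiv track=rewrite | github.com/laurynukas98/Advent-Of-Code-My-Solutions | 2024/Solutions/day5/main.py | ordering_check_part1
-- ===== SOURCE A (Python) =====
-- def ordering_check_part1(rules, page):
--     for i, char in enumerate(page):
--         for (x, y) in rules:
--             if char == x:
--                 for ib, charr in enumerate(page[:i]):
--                     if charr == y:
--                         return False
--     return True
-- ===== SOURCE B (Python) =====
-- def ordering_check_part1(rules, page):
--     first = {}
--     last = {}
--     for i, v in enumerate(page):
--         if v not in first:
--             first[v] = i
--         last[v] = i
--     for (x, y) in rules:
--         if x in last and y in first and first[y] < last[x]: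
--             return False
--     return True
-- ===== Notes on version B (the rewrite author's own statement) =====
-- stated objective: faster
-- what changed: B indexes first/last occurrence positions of each page value in dicts in one pass, then checks each rule once, instead of A's triple nested scan over page x rules x prefix.
import Mathlib
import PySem

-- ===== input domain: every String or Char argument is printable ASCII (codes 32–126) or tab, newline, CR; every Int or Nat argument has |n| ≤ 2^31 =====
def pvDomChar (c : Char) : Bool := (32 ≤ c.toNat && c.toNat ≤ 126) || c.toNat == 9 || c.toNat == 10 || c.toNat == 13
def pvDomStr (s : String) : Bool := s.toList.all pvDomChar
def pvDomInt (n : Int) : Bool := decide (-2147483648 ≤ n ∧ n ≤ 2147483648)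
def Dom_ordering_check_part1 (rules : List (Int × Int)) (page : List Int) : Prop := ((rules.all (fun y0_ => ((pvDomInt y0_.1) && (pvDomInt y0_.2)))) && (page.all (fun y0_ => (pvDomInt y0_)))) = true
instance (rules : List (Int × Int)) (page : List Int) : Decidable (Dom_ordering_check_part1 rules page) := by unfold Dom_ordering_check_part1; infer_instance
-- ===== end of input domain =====

-- B builds first/last occurrence dicts in one pass and checks each rule once (O(n + R)),
-- instead of A's nested scan of page × rules × prefix (O(n² · R)).

-- ===== PORT A =====
-- for i, char in enumerate(page): for (x,y) in rules: if char == x: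
--   for ib, charr in enumerate(page[:i]): if charr == y: return False
-- return True
def ordering_check_part1 (rules : List (Int × Int)) (page : List Int) : Bool :=
  !((PySem.List.enumerate page 0).any (fun ic =>
      rules.any (fun xy =>
        ic.2 == xy.1 &&
        (PySem.List.enumerate (PySem.List.slice page none (some ic.1)) 0).any
          (fun jc => jc.2 == xy.2))))

-- ===== PORT B =====
-- one pass over enumerate(page): first[v] set only if absent, last[v] overwritten
def pvStepFL (fl : PySem.Dict Int Int × PySem.Dict Int Int) (p : Int × Int) :
    PySem.Dict Int Int × PySem.Dict Int Int :=
  ((if fl.1.contains p.2 then fl.1 else fl.1.insert p.2 p.1), fl.2.insert p.2 p.1)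

def ordering_check_part1_alt (rules : List (Int × Int)) (page : List Int) : Bool :=
  let fl := (PySem.List.enumerate page 0).foldl pvStepFL (PySem.Dict.empty, PySem.Dict.empty)
  !(rules.any (fun xy =>
      match fl.2.get? xy.1, fl.1.get? xy.2 with
      | some li, some fj => fj < li
      | _, _ => false))

-- ===== PRECONDITION & SPEC =====
def Spec_ordering_check_part1 (rules : List (Int × Int)) (page : List Int) (out : Bool) : Prop := out = ordering_check_part1_alt rules page
instance (rules : List (Int × Int)) (page : List Int) (out : Bool) : Decidable (Spec_ordering_check_part1 rules page out) := by unfold Spec_ordering_check_part1; infer_instance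

-- ===== CLAIM (what is proved, stated in full; the proofs are below) =====
def Claim_equal_ordering_check_part1 : Prop := ∀ (rules : List (Int × Int)) (page : List Int), Dom_ordering_check_part1 rules page → Spec_ordering_check_part1 rules page (ordering_check_part1 rules page)

-- ===== LEMMAS AND PROOFS =====

-- first index of x in l, positions offset by s (none = absent)
def pvFirstIdx : List Int → Int → Int → Option Int
  | [], _, _ => none
  | a :: t, s, x => if a = x then some s else pvFirstIdx t (s + 1) x

-- last index of x in l, positions offset by s
def pvLastIdx : List Int → Int → Int → Option Int
  | [], _, _ => none
  | a :: t, s, x => (pvLastIdx t (s + 1) x).or (if a = x then some s else none)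

def pvStepF (d : PySem.Dict Int Int) (p : Int × Int) : PySem.Dict Int Int :=
  if d.contains p.2 then d else d.insert p.2 p.1

def pvStepL (d : PySem.Dict Int Int) (p : Int × Int) : PySem.Dict Int Int :=
  d.insert p.2 p.1

theorem pvFoldFL (l : List (Int × Int)) (d1 d2 : PySem.Dict Int Int) :
    l.foldl pvStepFL (d1, d2) = (l.foldl pvStepF d1, l.foldl pvStepL d2) := by
  induction l generalizing d1 d2 with
  | nil => rfl
  | cons p t ih => simp [List.foldl, pvStepFL, pvStepF, pvStepL, ih]

theorem pvFoldF_get? (page : List Int) (s : Int) (d : PySem.Dict Int Int) (x : Int) :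
    ((PySem.List.enumerate page s).foldl pvStepF d).get? x = (d.get? x).or (pvFirstIdx page s x) := by
  induction page generalizing s d with
  | nil => simp [PySem.List.enumerate_nil, pvFirstIdx]
  | cons a t ih =>
    rw [PySem.List.enumerate_cons, List.foldl_cons]
    show ((PySem.List.enumerate t (s + 1)).foldl pvStepF (pvStepF d (s, a))).get? x = _
    rw [ih]
    unfold pvStepF
    by_cases hc : d.contains a = true
    · simp only [hc, if_true]
      by_cases hax : a = x
      · subst hax
        rcases ho : d.get? a with _ | v
        · rw [PySem.Dict.get?_eq_none_iff_contains] at ho; simp [ho] at hc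
        · simp [pvFirstIdx]
      · simp [pvFirstIdx, hax]
    · simp only [hc]
      have hn : d.get? a = none := (PySem.Dict.get?_eq_none_iff_contains d a).mpr (by simpa using hc)
      by_cases hax : a = x
      · subst hax
        simp [hn, pvFirstIdx]
      · simp [PySem.Dict.get?_insert, pvFirstIdx, hax, Ne.symm hax]

theorem pvFoldL_get? (page : List Int) (s : Int) (d : PySem.Dict Int Int) (x : Int) :
    ((PySem.List.enumerate page s).foldl pvStepL d).get? x = (pvLastIdx page s x).or (d.get? x) := by
  induction page generalizing s d with
  | nil => simp [PySem.List.enumerate_nil, pvLastIdx]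
  | cons a t ih =>
    rw [PySem.List.enumerate_cons, List.foldl_cons]
    show ((PySem.List.enumerate t (s + 1)).foldl pvStepL (pvStepL d (s, a))).get? x = _
    rw [ih]
    show (pvLastIdx t (s + 1) x).or ((d.insert a s).get? x) = _
    rw [PySem.Dict.get?_insert]
    have hrec : pvLastIdx (a :: t) s x
        = (pvLastIdx t (s + 1) x).or (if a = x then some s else none) := rfl
    rw [hrec]
    by_cases hax : x = a
    · subst hax; simp
    · have h2 : ¬ a = x := fun h => hax h.symm
      simp [hax, h2]

theorem pvFirstIdx_some (page : List Int) (s : Int) (y f : Int) :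
    pvFirstIdx page s y = some f → ∃ fn : Nat, f = s + fn ∧ ∃ h : fn < page.length, page[fn] = y := by
  induction page generalizing s with
  | nil => simp [pvFirstIdx]
  | cons a t ih =>
    unfold pvFirstIdx
    by_cases hay : a = y
    · subst hay
      intro h
      rw [if_pos rfl] at h
      have hf : f = s := by simpa using h.symm
      exact ⟨0, by omega, by simp, by simp⟩
    · simp only [hay, if_false]
      intro h
      obtain ⟨fn, hfn, hlt, hv⟩ := ih (s + 1) h
      exact ⟨fn + 1, by omega, by simpa using hlt, by simpa using hv⟩

theorem pvLastIdx_some (page : List Int) (s : Int) (x l : Int) :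
    pvLastIdx page s x = some l → ∃ ln : Nat, l = s + ln ∧ ∃ h : ln < page.length, page[ln] = x := by
  induction page generalizing s l with
  | nil => simp [pvLastIdx]
  | cons a t ih =>
    unfold pvLastIdx
    intro h
    rcases ht : pvLastIdx t (s + 1) x with _ | l'
    · rw [ht] at h
      by_cases hax : a = x
      · subst hax
        simp at h
        exact ⟨0, by omega, by simp, by simp⟩
      · simp [hax] at h
    · rw [ht] at h
      simp [Option.or] at h
      obtain ⟨ln, hln, hlt, hv⟩ := ih (s + 1) l' ht
      subst h
      exact ⟨ln + 1, by omega, by simpa using hlt, by simpa using hv⟩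

theorem pvFirstIdx_le (page : List Int) (s : Int) (y : Int) (j : Nat) (hj : j < page.length)
    (hy : page[j] = y) : ∃ fn : Nat, fn ≤ j ∧ pvFirstIdx page s y = some (s + fn) := by
  induction page generalizing s j with
  | nil => simp at hj
  | cons a t ih =>
    unfold pvFirstIdx
    by_cases hay : a = y
    · exact ⟨0, Nat.zero_le _, by simp [hay]⟩
    · cases j with
      | zero => simp at hy; exact absurd hy hay
      | succ j' =>
        obtain ⟨fn, hle, heq⟩ := ih (s + 1) j' (by simpa using hj) (by simpa using hy)
        exact ⟨fn + 1, by omega, by simp [hay, heq]; ring_nf⟩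

theorem pvLastIdx_ge (page : List Int) (s : Int) (x : Int) (i : Nat) (hi : i < page.length)
    (hx : page[i] = x) : ∃ ln : Nat, i ≤ ln ∧ pvLastIdx page s x = some (s + ln) := by
  induction page generalizing s i with
  | nil => simp at hi
  | cons a t ih =>
    unfold pvLastIdx
    cases i with
    | zero =>
      rcases ht : pvLastIdx t (s + 1) x with _ | l'
      · simp at hx
        exact ⟨0, le_refl _, by simp [hx]⟩
      · obtain ⟨ln, _, hlt, _⟩ := pvLastIdx_some t (s + 1) x l' ht
        exact ⟨ln + 1, by omega, by simp [ht, Option.or]; omega⟩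
    | succ i' =>
      obtain ⟨ln, hle, heq⟩ := ih (s + 1) i' (by simpa using hi) (by simpa using hx)
      refine ⟨ln + 1, by omega, ?_⟩
      rw [heq]
      simp [Option.or]; ring_nf

-- the violation predicate both programs detect
def pvViol (page : List Int) (x y : Int) : Prop :=
  ∃ i j : Nat, j < i ∧ page[i]? = some x ∧ page[j]? = some y

theorem pvA_iff (rules : List (Int × Int)) (page : List Int) :
    ((PySem.List.enumerate page 0).any (fun ic =>
      rules.any (fun xy =>
        ic.2 == xy.1 &&
        (PySem.List.enumerate (PySem.List.slice page none (some ic.1)) 0).any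
          (fun jc => jc.2 == xy.2)))) = true ↔ ∃ xy ∈ rules, pvViol page xy.1 xy.2 := by
  rw [List.any_eq_true]
  constructor
  · rintro ⟨ic, hic, h⟩
    rw [PySem.List.mem_enumerate_iff] at hic
    obtain ⟨k, hk, rfl⟩ := hic
    rw [List.any_eq_true] at h
    obtain ⟨xy, hxy, h⟩ := h
    simp only [Bool.and_eq_true, beq_iff_eq] at h
    obtain ⟨hx, h2⟩ := h
    have hsl : PySem.List.slice page none (some ((0:Int) + (k:Int))) = page.take k := by
      rw [show ((0:Int) + (k:Int)) = ((k:Nat):Int) by ring,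
        PySem.List.slice_to_natCast]
    rw [hsl, List.any_eq_true] at h2
    obtain ⟨jc, hjc, hjy⟩ := h2
    rw [PySem.List.mem_enumerate_iff] at hjc
    obtain ⟨j, hj, rfl⟩ := hjc
    simp only [beq_iff_eq] at hjy
    have hjk : j < k := by simp at hj; omega
    refine ⟨xy, hxy, k, j, hjk, ?_, ?_⟩
    · rw [List.getElem?_eq_getElem hk, hx]
    · have hjl : j < page.length := by simp at hj; omega
      rw [List.getElem?_eq_getElem hjl]
      rw [List.getElem_take] at hjy
      rw [hjy]
  · rintro ⟨xy, hxy, i, j, hji, hi, hj⟩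
    rw [List.getElem?_eq_some_iff] at hi hj
    obtain ⟨hil, hival⟩ := hi
    obtain ⟨hjl, hjval⟩ := hj
    refine ⟨((0:Int) + (i:Int), page[i]), ?_, ?_⟩
    · rw [PySem.List.mem_enumerate_iff]; exact ⟨i, hil, rfl⟩
    · rw [List.any_eq_true]
      refine ⟨xy, hxy, ?_⟩
      simp only [Bool.and_eq_true, beq_iff_eq]
      refine ⟨hival, ?_⟩
      have hsl : PySem.List.slice page none (some ((0:Int) + (i:Int))) = page.take i := by
        rw [show ((0:Int) + (i:Int)) = ((i:Nat):Int) by ring,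
          PySem.List.slice_to_natCast]
      rw [hsl, List.any_eq_true]
      have hjt : j < (page.take i).length := by simp; omega
      refine ⟨((0:Int) + (j:Int), (page.take i)[j]), ?_, ?_⟩
      · rw [PySem.List.mem_enumerate_iff]; exact ⟨j, hjt, rfl⟩
      · simp only [beq_iff_eq]
        rw [List.getElem_take, hjval]

theorem pvB_iff (rules : List (Int × Int)) (page : List Int) :
    (rules.any (fun xy =>
      match (((PySem.List.enumerate page 0).foldl pvStepFL (PySem.Dict.empty, PySem.Dict.empty)).2.get? xy.1),
            (((PySem.List.enumerate page 0).foldl pvStepFL (PySem.Dict.empty, PySem.Dict.empty)).1.get? xy.2) with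
      | some li, some fj => fj < li
      | _, _ => false)) = true ↔ ∃ xy ∈ rules, pvViol page xy.1 xy.2 := by
  rw [pvFoldFL, List.any_eq_true]
  have hL : ∀ v, ((PySem.List.enumerate page 0).foldl pvStepL PySem.Dict.empty).get? v
      = pvLastIdx page 0 v := by
    intro v; rw [pvFoldL_get?]; simp [PySem.Dict.get?_empty]
  have hF : ∀ v, ((PySem.List.enumerate page 0).foldl pvStepF PySem.Dict.empty).get? v
      = pvFirstIdx page 0 v := by
    intro v; rw [pvFoldF_get?]; simp [PySem.Dict.get?_empty]
  constructor
  · rintro ⟨xy, hxy, h⟩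
    rw [hL, hF] at h
    rcases hlast : pvLastIdx page 0 xy.1 with _ | li
    · rw [hlast] at h; rcases pvFirstIdx page 0 xy.2 with _ | fj <;> simp at h
    rcases hfirst : pvFirstIdx page 0 xy.2 with _ | fj
    · rw [hlast, hfirst] at h; simp at h
    rw [hlast, hfirst] at h
    simp only [decide_eq_true_eq] at h
    obtain ⟨ln, hln, hlnlt, hlnv⟩ := pvLastIdx_some page 0 xy.1 li hlast
    obtain ⟨fn, hfn, hfnlt, hfnv⟩ := pvFirstIdx_some page 0 xy.2 fj hfirst
    refine ⟨xy, hxy, ln, fn, by omega, ?_, ?_⟩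
    · rw [List.getElem?_eq_getElem hlnlt, hlnv]
    · rw [List.getElem?_eq_getElem hfnlt, hfnv]
  · rintro ⟨xy, hxy, i, j, hji, hi, hj⟩
    rw [List.getElem?_eq_some_iff] at hi hj
    obtain ⟨hil, hival⟩ := hi
    obtain ⟨hjl, hjval⟩ := hj
    obtain ⟨ln, hln, hlast⟩ := pvLastIdx_ge page 0 xy.1 i hil hival
    obtain ⟨fn, hfn, hfirst⟩ := pvFirstIdx_le page 0 xy.2 j hjl hjval
    refine ⟨xy, hxy, ?_⟩
    rw [hL, hF, hlast, hfirst]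
    simp only [decide_eq_true_eq]
    omega

-- ===== VERDICT (by name: the statement is the Claim_ definition above) =====
theorem ordering_check_part1_spec : Claim_equal_ordering_check_part1 := by
  intro rules page _
  unfold Spec_ordering_check_part1 ordering_check_part1 ordering_check_part1_alt
  have h := (pvA_iff rules page).trans (pvB_iff rules page).symm
  show _ = !(rules.any _)
  congr 1
  exact Bool.eq_iff_iff.mpr h
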